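-- pv_equiv track=rewrite | github.com/victorchu/algorithms | python3/others/prinson_cells.py | prisonAfterNDays_v1
-- ===== SOURCE A (Python) =====
-- from typing import List
--
-- def prisonAfterNDays_v1(cells: List[int], N: int) -> List[int]:
--     """Use arrays."""
--     num_cells = len(cells)
--     working_cells = [
--         cells.copy(),
--         [0] * num_cells
--     ]
--     for i in range(1, N+1):
--         curr_idx = i % 2
--         curr_cells = working_cells[curr_idx]
--         prev_cells = working_cells[1 - curr_idx]
--         curr_cells[0] = curr_cells[-1] = 0
--         for j in range(1, num_cells-1):
--             curr_cells[j] = 1 if prev_cells[j-1] == prev_cells[j+1] else 0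
--
--     curr_idx = N % 2
--     return working_cells[curr_idx]
-- ===== SOURCE B (Python) =====
-- from typing import List
--
-- def prisonAfterNDays_v1(cells: List[int], N: int) -> List[int]:
--     """Cycle detection: record each state's first day; once a state repeats,
--     reduce the remaining days modulo the cycle length and finish directly."""
--     def step(state):
--         n = len(state)
--         return tuple(1 if 0 < j < n - 1 and state[j - 1] == state[j + 1] else 0
--                      for j in range(n))
--
--     state = tuple(cells)
--     seen = {}
--     day = 0
--     while day < N:
--         if state in seen:
--             cycle = day - seen[state]
--             rem = (N - day) % cycle
--             for _ in range(rem):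
--                 state = step(state)
--             return list(state)
--         seen[state] = day
--         state = step(state)
--         day += 1
--     return list(state)
-- ===== Notes on version B (the rewrite author's own statement) =====
-- stated objective: alternative
-- what changed: A simulates every one of the N days with a two-buffer array loop; B records each state's first day in a dict and, on the first repeated state, reduces the remaining days modulo the cycle length and exits, so it never simulates more than one full period.
-- intended difference: For negative odd N, A returns its never-computed zero buffer [0]*len(cells) (leftover loop state), while B runs the loop zero times and returns cells unchanged, the intended 'no days simulated' value. — e.g. on prisonAfterNDays_v1([1], -1): A returns [0], B returns [1]
-- outside the precondition, e.g. on prisonAfterNDays_v1([], 2): A raises IndexError, B returns []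
import Mathlib
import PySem

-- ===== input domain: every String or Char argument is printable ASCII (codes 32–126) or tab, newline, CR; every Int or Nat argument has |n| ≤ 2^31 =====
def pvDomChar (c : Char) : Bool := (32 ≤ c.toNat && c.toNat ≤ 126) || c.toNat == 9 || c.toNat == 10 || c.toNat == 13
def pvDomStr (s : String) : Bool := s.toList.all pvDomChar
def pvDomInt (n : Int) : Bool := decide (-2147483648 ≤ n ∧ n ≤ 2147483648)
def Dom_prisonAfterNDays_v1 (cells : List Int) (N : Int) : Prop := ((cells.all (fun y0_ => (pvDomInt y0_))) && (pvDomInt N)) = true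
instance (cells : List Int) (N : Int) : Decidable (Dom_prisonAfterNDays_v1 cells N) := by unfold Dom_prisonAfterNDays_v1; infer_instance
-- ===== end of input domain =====

-- B replaces A's day-by-day double-buffer simulation by state hashing with cycle detection
-- (once a state repeats, the remaining days are reduced modulo the cycle length and the loop
-- exits early); equivalence of the RETURN values is proved.

-- ===== PORT A =====
-- one day of A's inner loop: curr_cells[0] = curr_cells[-1] = 0; then
-- for j in range(1, num_cells-1): curr_cells[j] = 1 if prev_cells[j-1] == prev_cells[j+1] else 0
-- (indices j-1, j+1 are provably in range, so the total forms pyGetD/pySetD are exact here)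
def pvDayA (prev curr : List Int) : List Int :=
  let n : Int := curr.length
  let curr := PySem.List.pySetD curr 0 0
  let curr := PySem.List.pySetD curr (-1) 0
  (PySem.List.pyRange 1 (n - 1) 1).foldl
    (fun c j =>
      PySem.List.pySetD c j
        (if PySem.List.pyGetD prev (j - 1) 0 == PySem.List.pyGetD prev (j + 1) 0 then (1 : Int) else 0))
    curr

def prisonAfterNDays_v1 (cells : List Int) (N : Int) : List Int :=
  let numCells := cells.length
  -- working_cells = [cells.copy(), [0]*num_cells]; the pair (w.1, w.2) is working_cells[0], working_cells[1]
  let w : List Int × List Int := (cells, List.replicate numCells 0)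
  let w := (PySem.List.pyRange 1 (N + 1) 1).foldl
    (fun w i =>
      let currIdx := PySem.Int.mod i 2
      if currIdx == 1 then (w.1, pvDayA w.1 w.2) else (pvDayA w.2 w.1, w.2))
    w
  if PySem.Int.mod N 2 == 1 then w.2 else w.1

-- ===== PORT B =====
-- def step(state): return tuple(1 if 0 < j < n-1 and state[j-1] == state[j+1] else 0 for j in range(n))
def pvStepB (state : List Int) : List Int :=
  let n : Int := state.length
  (PySem.List.pyRange 0 n 1).map
    (fun j =>
      if 0 < j ∧ j < n - 1 ∧ PySem.List.pyGetD state (j - 1) 0 = PySem.List.pyGetD state (j + 1) 0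
      then (1 : Int) else 0)

-- the while loop of Source B; fuel is a totality guard only (every call keeps fuel ≥ (N - day).toNat,
-- so the fuel-0 branch is unreachable)
def pvGoB (N : Int) (fuel : Nat) (state : List Int) (seen : PySem.Dict (List Int) Int) (day : Int) : List Int :=
  if day < N then
    match fuel with
    | 0 => state
    | fuel' + 1 =>
      match seen.get? state with
      | some d0 =>
        let cycle := day - d0
        let rem := PySem.Int.mod (N - day) cycle
        (PySem.List.pyRange 0 rem 1).foldl (fun s _ => pvStepB s) state
      | none => pvGoB N fuel' (pvStepB state) (seen.insert state day) (day + 1)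
  else state

def prisonAfterNDays_v1_alt (cells : List Int) (N : Int) : List Int :=
  pvGoB N N.toNat cells PySem.Dict.empty 0

-- ===== PRECONDITION & SPEC =====
-- Pre_ excludes only the inputs where A raises: cells = [] with N >= 1 (IndexError on curr_cells[0] = 0).
def Pre_prisonAfterNDays_v1 (cells : List Int) (N : Int) : Prop := cells ≠ [] ∨ N ≤ 0
instance (cells : List Int) (N : Int) : Decidable (Pre_prisonAfterNDays_v1 cells N) := by unfold Pre_prisonAfterNDays_v1; infer_instance
def pvWitness_prisonAfterNDays_v1 : List Int × Int := ([1, 0, 1, 0], 3)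

-- For negative odd N A returns its never-written zero buffer [0]*len(cells) (leftover loop state),
-- while B runs the loop zero times and returns the cells unchanged — the intended "no days elapsed" value.
def D_prisonAfterNDays_v1 (cells : List Int) (N : Int) : Prop :=
  N < 0 ∧ PySem.Int.mod N 2 = 1 ∧ cells ≠ List.replicate cells.length 0
instance (cells : List Int) (N : Int) : Decidable (D_prisonAfterNDays_v1 cells N) := by unfold D_prisonAfterNDays_v1; infer_instance

def Spec_prisonAfterNDays_v1 (cells : List Int) (N : Int) (out : List Int) : Prop :=
  ¬ D_prisonAfterNDays_v1 cells N → out = prisonAfterNDays_v1_alt cells N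
instance (cells : List Int) (N : Int) (out : List Int) : Decidable (Spec_prisonAfterNDays_v1 cells N out) := by unfold Spec_prisonAfterNDays_v1; infer_instance

def pvDiffWitness_prisonAfterNDays_v1 : List Int × Int := ([1], -1)
def pvDiffWitnessOut_prisonAfterNDays_v1 : (List Int) × (List Int) := ([0], [1])

-- ===== CLAIM (what is proved, stated in full; the proofs are below) =====
def Claim_unchanged_prisonAfterNDays_v1 : Prop := ∀ (cells : List Int) (N : Int), Dom_prisonAfterNDays_v1 cells N → Pre_prisonAfterNDays_v1 cells N → Spec_prisonAfterNDays_v1 cells N (prisonAfterNDays_v1 cells N)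
def Claim_changed_prisonAfterNDays_v1 : Prop := Dom_prisonAfterNDays_v1 (pvDiffWitness_prisonAfterNDays_v1.1) (pvDiffWitness_prisonAfterNDays_v1.2) ∧ Pre_prisonAfterNDays_v1 (pvDiffWitness_prisonAfterNDays_v1.1) (pvDiffWitness_prisonAfterNDays_v1.2) ∧ D_prisonAfterNDays_v1 (pvDiffWitness_prisonAfterNDays_v1.1) (pvDiffWitness_prisonAfterNDays_v1.2) ∧ prisonAfterNDays_v1 (pvDiffWitness_prisonAfterNDays_v1.1) (pvDiffWitness_prisonAfterNDays_v1.2) = pvDiffWitnessOut_prisonAfterNDays_v1.1 ∧ prisonAfterNDays_v1_alt (pvDiffWitness_prisonAfterNDays_v1.1) (pvDiffWitness_prisonAfterNDays_v1.2) = pvDiffWitnessOut_prisonAfterNDays_v1.2 ∧ pvDiffWitnessOut_prisonAfterNDays_v1.1 ≠ pvDiffWitnessOut_prisonAfterNDays_v1.2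
def Claim_exact_prisonAfterNDays_v1 : Prop := ∀ (cells : List Int) (N : Int), Dom_prisonAfterNDays_v1 cells N → Pre_prisonAfterNDays_v1 cells N → D_prisonAfterNDays_v1 cells N → prisonAfterNDays_v1 cells N ≠ prisonAfterNDays_v1_alt cells N

-- ===== LEMMAS AND PROOFS =====

theorem length_pvStepB (s : List Int) : (pvStepB s).length = s.length := by
  simp [pvStepB, PySem.List.length_pyRange_one]

theorem length_iter_pvStepB (s : List Int) (k : Nat) : (pvStepB^[k] s).length = s.length := by
  induction k generalizing s with
  | zero => rfl
  | succ k ih => rw [Function.iterate_succ_apply]; rw [ih, length_pvStepB]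

theorem getElem?_pvStepB (s : List Int) (j : Nat) (hj : j < s.length) :
    (pvStepB s)[j]? = some (if 0 < (j : Int) ∧ (j : Int) < (s.length : Int) - 1 ∧
      PySem.List.pyGetD s ((j : Int) - 1) 0 = PySem.List.pyGetD s ((j : Int) + 1) 0 then (1 : Int) else 0) := by
  simp only [pvStepB]
  exact PySem.List.getElem?_map_pyRange_zero _ _ _ hj

theorem length_foldl_pySetD (f : Int → Int) (l : List Int) (base : List Int) :
    (l.foldl (fun c i => PySem.List.pySetD c i (f i)) base).length = base.length := by
  induction l generalizing base with
  | nil => rfl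
  | cons a t ih => simp only [List.foldl_cons]; rw [ih, PySem.List.length_pySetD]

theorem getElem?_foldl_pySetD (f : Int → Int) (k : Nat) :
    ∀ (a : Int) (base : List Int) (j : Nat), 0 ≤ a → a + k ≤ (base.length : Int) →
    ((PySem.List.pyRange a (a + k) 1).foldl (fun c i => PySem.List.pySetD c i (f i)) base)[j]?
      = if a ≤ (j : Int) ∧ (j : Int) < a + k then some (f (j : Int)) else base[j]? := by
  induction k with
  | zero =>
    intro a base j _ _
    rw [show a + (0 : Nat) = a by push_cast; ring, PySem.List.pyRange_one_eq_nil (le_refl a)]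
    simp only [List.foldl_nil]
    rw [if_neg (by omega)]
  | succ k ih =>
    intro a base j ha hlen
    rw [PySem.List.pyRange_one_cons (by push_cast; omega)]
    simp only [List.foldl_cons]
    rw [show a + ((k : Nat) + 1 : Nat) = (a + 1) + (k : Nat) by push_cast; ring]
    rw [ih (a + 1) _ j (by omega) (by rw [PySem.List.length_pySetD]; push_cast at hlen ⊢; omega)]
    rw [PySem.List.pySetD_of_nonneg _ _ ha]
    by_cases hja : (j : Int) = a
    · rw [if_neg (by omega), if_pos (by omega)]
      have haj : a.toNat = j := by omega
      rw [haj, List.getElem?_set_self (by push_cast at hlen; omega), hja]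
    · by_cases hge : a + 1 ≤ (j : Int) ∧ (j : Int) < a + 1 + k
      · rw [if_pos hge, if_pos (by omega)]
      · rw [if_neg hge, if_neg (by omega)]
        rw [List.getElem?_set_ne (by omega)]

theorem pySetD_neg_one (xs : List Int) (v : Int) (h : xs ≠ []) :
    PySem.List.pySetD xs (-1) v = xs.set (xs.length - 1) v := by
  have h2 : 0 < xs.length := List.length_pos_iff.mpr h
  simp only [PySem.List.pySetD, PySem.List.pySet?, PySem.List.pyIdx?]
  rw [if_neg (by omega), if_pos (by push_cast; omega)]
  simp

-- one day of A equals B's step, given matching nonempty lengths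
theorem pvDayA_eq_pvStepB (prev curr : List Int) (h : curr.length = prev.length) (hne : prev ≠ []) :
    pvDayA prev curr = pvStepB prev := by
  have hn : 1 ≤ prev.length := List.length_pos_iff.mpr hne
  simp only [pvDayA]
  rw [PySem.List.pySetD_of_nonneg _ _ (by omega : (0:Int) ≤ 0)]
  rw [show ((0:Int).toNat = 0) from rfl]
  rw [pySetD_neg_one _ _ (by
    intro hc
    have := congrArg List.length hc
    simp only [List.length_set, List.length_nil] at this
    omega)]
  set base : List Int := ((curr.set 0 0).set ((curr.set 0 0).length - 1) 0) with hbase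
  have hblen : base.length = prev.length := by simp [hbase, h]
  have hb0 : ∀ j : Nat, j < base.length → (j = 0 ∨ j = base.length - 1) → base[j]? = some (0:Int) := by
    intro j hj hcase
    simp only [hbase, List.length_set] at hj hcase ⊢
    rcases hcase with hz | hlast
    · subst hz
      by_cases hl : curr.length - 1 = 0
      · rw [← hl, List.getElem?_set_self (by simp; omega)]
      · rw [List.getElem?_set_ne (by omega), List.getElem?_set_self (by omega)]
    · subst hlast
      rw [List.getElem?_set_self (by simp; omega)]
  apply List.ext_getElem?
  intro j
  by_cases hj : j < prev.length
  · have hfold :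
        ((PySem.List.pyRange 1 ((curr.length : Int) - 1) 1).foldl
          (fun c jj => PySem.List.pySetD c jj
            (if PySem.List.pyGetD prev (jj - 1) 0 == PySem.List.pyGetD prev (jj + 1) 0 then (1:Int) else 0)) base)[j]?
          = if (1:Int) ≤ (j : Int) ∧ (j : Int) < 1 + ((prev.length - 2 : Nat) : Int)
            then some (if PySem.List.pyGetD prev ((j:Int) - 1) 0 == PySem.List.pyGetD prev ((j:Int) + 1) 0 then (1:Int) else 0)
            else base[j]? := by
      have hr : (curr.length : Int) - 1 = 1 + ((prev.length - 2 : Nat) : Int) ∨ ((curr.length : Int) - 1 ≤ 1 ∧ prev.length = 1) := by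
        rw [h]; push_cast; omega
      rcases hr with hr | ⟨hr, h1⟩
      · rw [hr]
        exact getElem?_foldl_pySetD _ _ 1 base j (by omega) (by rw [hblen]; push_cast; omega)
      · rw [PySem.List.pyRange_one_eq_nil hr]
        simp only [List.foldl_nil]
        rw [if_neg (by push_cast; omega)]
    rw [hfold]
    rw [getElem?_pvStepB prev j hj]
    by_cases hmid : (1:Int) ≤ (j : Int) ∧ (j : Int) < 1 + ((prev.length - 2 : Nat) : Int)
    · rw [if_pos hmid]
      have hridx : 0 < (j:Int) ∧ (j:Int) < (prev.length : Int) - 1 := by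
        obtain ⟨h1, h2⟩ := hmid
        omega
      by_cases he : PySem.List.pyGetD prev ((j:Int) - 1) 0 = PySem.List.pyGetD prev ((j:Int) + 1) 0
      · rw [if_pos (beq_iff_eq.mpr he), if_pos ⟨hridx.1, hridx.2, he⟩]
      · rw [if_neg (by simpa using he), if_neg (by rintro ⟨_, _, hh⟩; exact he hh)]
    · rw [if_neg hmid]
      rw [if_neg (by rintro ⟨h1, h2, _⟩; exact hmid ⟨by omega, by omega⟩)]
      rw [hb0 j (by omega) (by rw [hblen]; omega)]
  · have e1 : ((PySem.List.pyRange 1 ((curr.length : Int) - 1) 1).foldl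
          (fun c jj => PySem.List.pySetD c jj
            (if PySem.List.pyGetD prev (jj - 1) 0 == PySem.List.pyGetD prev (jj + 1) 0 then (1:Int) else 0)) base).length = prev.length := by
      rw [length_foldl_pySetD, hblen]
    rw [List.getElem?_eq_none (by omega), List.getElem?_eq_none (by rw [length_pvStepB]; omega)]

-- ---------- A's outer loop ----------

def pvGA (cells : List Int) (m : Nat) : List Int × List Int :=
  if m = 0 then (cells, List.replicate cells.length 0)
  else if m % 2 = 1 then (pvStepB^[m - 1] cells, pvStepB^[m] cells)
  else (pvStepB^[m] cells, pvStepB^[m - 1] cells)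

theorem A_loop_eq (cells : List Int) (hne : cells ≠ []) (m : Nat) :
    ((PySem.List.pyRange 1 ((m : Int) + 1) 1).foldl
      (fun w i =>
        let currIdx := PySem.Int.mod i 2
        if currIdx == 1 then (w.1, pvDayA w.1 w.2) else (pvDayA w.2 w.1, w.2))
      (cells, List.replicate cells.length 0)) = pvGA cells m := by
  have hiter_ne : ∀ k : Nat, pvStepB^[k] cells ≠ [] := by
    intro k hk
    have := length_iter_pvStepB cells k
    rw [hk] at this
    cases cells <;> simp_all
  have hiter_len : ∀ k : Nat, (pvStepB^[k] cells).length = cells.length := length_iter_pvStepB cells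
  induction m with
  | zero =>
    rw [PySem.List.pyRange_one_eq_nil (by omega)]
    simp [pvGA]
  | succ m ih =>
    rw [show ((m + 1 : Nat) : Int) + 1 = (((m : Int) + 1) + 1) by push_cast; ring]
    rw [PySem.List.pyRange_one_succ_right (by omega)]
    rw [List.foldl_append, ih]
    simp only [List.foldl_cons, List.foldl_nil]
    have hmod : PySem.Int.mod ((m : Int) + 1) 2 = (((m + 1) % 2 : Nat) : Int) := by
      rw [show ((m : Int) + 1) = ((m + 1 : Nat) : Int) by push_cast; ring]
      exact PySem.Int.mod_natCast (m + 1) 2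
    rcases Nat.even_or_odd m with he | ho
    · have hme : m % 2 = 0 := Nat.even_iff.mp he
      have h1 : (m + 1) % 2 = 1 := by omega
      have hG : pvGA cells m = (pvStepB^[m] cells,
          if m = 0 then List.replicate cells.length 0 else pvStepB^[m - 1] cells) := by
        by_cases h0 : m = 0
        · subst h0; simp [pvGA]
        · have hm2 : m % 2 = 1 ↔ False := by
            constructor
            · intro hh; omega
            · intro hh; exact hh.elim
          simp [pvGA, h0, hm2]
      have hG1 : pvGA cells (m + 1) = (pvStepB^[m] cells, pvStepB^[m + 1] cells) := by
        simp [pvGA, h1]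
      rw [hG, hG1, hmod, h1]
      simp only [Nat.cast_one, beq_self_eq_true, if_true]
      have hXlen : (if m = 0 then List.replicate cells.length 0 else pvStepB^[m - 1] cells).length
          = (pvStepB^[m] cells).length := by
        rw [hiter_len m]; split <;> simp [hiter_len]
      rw [pvDayA_eq_pvStepB _ _ hXlen (hiter_ne m)]
      rw [← Function.iterate_succ_apply' pvStepB m cells]
    · have hm1 : m % 2 = 1 := Nat.odd_iff.mp ho
      have h1 : (m + 1) % 2 = 0 := by omega
      have hm0 : m ≠ 0 := by omega
      have hG : pvGA cells m = (pvStepB^[m - 1] cells, pvStepB^[m] cells) := by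
        simp [pvGA, hm0, hm1]
      have hG1 : pvGA cells (m + 1) = (pvStepB^[m + 1] cells, pvStepB^[m] cells) := by
        have h10 : m + 1 ≠ 0 := by omega
        have h1' : (m + 1) % 2 = 1 ↔ False := by
          constructor
          · intro hh; omega
          · intro hh; exact hh.elim
        simp [pvGA, h10, h1']
      rw [hG, hG1, hmod, h1]
      simp only [Nat.cast_zero]
      rw [if_neg (by decide)]
      rw [pvDayA_eq_pvStepB _ _ (by rw [hiter_len, hiter_len]) (hiter_ne m)]
      rw [← Function.iterate_succ_apply' pvStepB m cells]

theorem A_eq_iter (cells : List Int) (N : Int) (hne : cells ≠ []) (hN : 0 ≤ N) :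
    prisonAfterNDays_v1 cells N = pvStepB^[N.toNat] cells := by
  obtain ⟨m, rfl⟩ : ∃ m : Nat, N = (m : Int) := ⟨N.toNat, by omega⟩
  simp only [prisonAfterNDays_v1, Int.toNat_natCast]
  rw [A_loop_eq cells hne m]
  rw [show PySem.Int.mod (m : Int) 2 = ((m % 2 : Nat) : Int) from by
    exact_mod_cast PySem.Int.mod_natCast m 2]
  by_cases h0 : m = 0
  · subst h0
    norm_num [pvGA]
  · by_cases h2 : m % 2 = 1
    · rw [h2]
      simp only [Nat.cast_one, beq_self_eq_true, if_true]
      simp [pvGA, h0, h2]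
    · have h2' : m % 2 = 0 := by omega
      rw [h2']
      simp only [Nat.cast_zero]
      rw [if_neg (by decide)]
      have h2'' : m % 2 = 1 ↔ False := by
        constructor
        · intro hh; omega
        · intro hh; exact hh.elim
      simp [pvGA, h0, h2'']

theorem A_neg (cells : List Int) (N : Int) (hN : N < 0) :
    prisonAfterNDays_v1 cells N =
      if PySem.Int.mod N 2 == 1 then List.replicate cells.length 0 else cells := by
  simp only [prisonAfterNDays_v1]
  rw [PySem.List.pyRange_one_eq_nil (by omega)]
  simp

-- ---------- periodicity ----------

theorem iter_shift {α : Type} (f : α → α) (x : α) (a c : Nat) (h : f^[a + c] x = f^[a] x) :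
    ∀ (q t : Nat), f^[a + t + q * c] x = f^[a + t] x := by
  intro q
  induction q with
  | zero => intro t; simp
  | succ q ih =>
    intro t
    have : a + t + (q + 1) * c = t + q * c + (a + c) := by ring
    rw [this, Function.iterate_add_apply, h, ← Function.iterate_add_apply]
    have : t + q * c + a = a + t + q * c := by ring
    rw [this, ih]

theorem iter_periodic {α : Type} (f : α → α) (x : α) (a c : Nat) (hc : 0 < c)
    (h : f^[a + c] x = f^[a] x) (m k : Nat) (hm : a ≤ m) (hk : a ≤ k)
    (hdvd : (c : Int) ∣ ((m : Int) - (k : Int))) : f^[m] x = f^[k] x := by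
  have main : ∀ m k : Nat, a ≤ k → k ≤ m → ((c : Int) ∣ ((m : Int) - (k : Int))) → f^[m] x = f^[k] x := by
    intro m k hka hkm hdvd
    obtain ⟨z, hz⟩ := hdvd
    have hkm' : (k : Int) ≤ (m : Int) := by exact_mod_cast hkm
    have hc' : (0 : Int) < (c : Int) := by exact_mod_cast hc
    have hz0 : 0 ≤ z := by
      by_contra h'
      push_neg at h'
      have : (c : Int) * z < 0 := mul_neg_of_pos_of_neg hc' h'
      linarith
    obtain ⟨t, ht⟩ := Nat.exists_eq_add_of_le hka
    have hm2 : m = a + t + z.toNat * c := by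
      have : (m : Int) = (a : Int) + (t : Int) + ((z.toNat : Int)) * (c : Int) := by
        rw [Int.toNat_of_nonneg hz0]
        have hk2 : (k : Int) = (a : Int) + (t : Int) := by exact_mod_cast ht
        linarith [hz]
      exact_mod_cast this
    rw [hm2, ht]
    exact iter_shift f x a c h z.toNat t
  rcases le_total k m with h1 | h1
  · exact main m k hk h1 hdvd
  · refine (main k m hm h1 ?_).symm
    rw [← neg_sub]
    exact dvd_neg.mpr hdvd

-- ---------- B's loop ----------

theorem foldl_ignore_iterate {α β : Type} (f : α → α) (l : List β) (x : α) :
    l.foldl (fun s _ => f s) x = f^[l.length] x := by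
  induction l generalizing x with
  | nil => rfl
  | cons a t ih => simp [List.foldl_cons, ih, Function.iterate_succ_apply]

theorem B_go_eq (cells : List Int) (N : Int) :
    ∀ (fuel : Nat) (d : Int) (seen : PySem.Dict (List Int) Int),
    0 ≤ d → d ≤ N → (N - d).toNat ≤ fuel →
    (∀ p ∈ seen.items, 0 ≤ p.2 ∧ p.2 < d ∧ pvStepB^[p.2.toNat] cells = p.1) →
    pvGoB N fuel (pvStepB^[d.toNat] cells) seen d = pvStepB^[N.toNat] cells := by
  intro fuel
  induction fuel with
  | zero =>
    intro d seen hd0 hdN hfuel _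
    have : d = N := by omega
    subst this
    rw [pvGoB, if_neg (by omega)]
  | succ fuel ih =>
    intro d seen hd0 hdN hfuel hinv
    by_cases hlt : d < N
    · rw [pvGoB, if_pos hlt]
      cases hget : PySem.Dict.get? seen (pvStepB^[d.toNat] cells) with
      | none =>
        simp only
        have hsucc : pvStepB (pvStepB^[d.toNat] cells) = pvStepB^[(d + 1).toNat] cells := by
          rw [← Function.iterate_succ_apply' pvStepB]
          congr 1
          omega
        rw [hsucc]
        apply ih (d + 1) _ (by omega) (by omega) (by omega)
        intro p hp
        rw [PySem.Dict.mem_items_insert] at hp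
        rcases hp with hp | ⟨hp, _⟩
        · subst hp; exact ⟨hd0, by omega, rfl⟩
        · obtain ⟨h1, h2, h3⟩ := hinv p hp
          exact ⟨h1, by omega, h3⟩
      | some d0 =>
        simp only
        obtain ⟨h0, hlt0, heq⟩ := hinv (pvStepB^[d.toNat] cells, d0)
          (PySem.Dict.mem_items_of_get?_eq_some seen hget)
        simp only at h0 hlt0 heq
        set cyc := d - d0 with hcyc
        have hcycpos : 0 < cyc := by omega
        set rem := PySem.Int.mod (N - d) cyc with hrem
        have hrem0 : 0 ≤ rem := PySem.Int.mod_nonneg _ hcycpos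
        rw [foldl_ignore_iterate, PySem.List.length_pyRange_one]
        rw [show rem - 0 = rem by ring]
        rw [← Function.iterate_add_apply]
        -- periodicity: f^[d0.toNat + cyc.toNat] = f^[d0.toNat]
        have hper : pvStepB^[d0.toNat + cyc.toNat] cells = pvStepB^[d0.toNat] cells := by
          have : d0.toNat + cyc.toNat = d.toNat := by omega
          rw [this, heq]
        apply iter_periodic pvStepB cells d0.toNat cyc.toNat (by omega) hper
        · omega
        · omega
        · have hqc := PySem.Int.floordiv_mul_add_mod (N - d) cyc
          refine ⟨-(PySem.Int.floordiv (N - d) cyc), ?_⟩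
          push_cast [Int.toNat_of_nonneg hrem0, Int.toNat_of_nonneg hd0,
            Int.toNat_of_nonneg (le_trans hd0 hdN), Int.toNat_of_nonneg (le_of_lt hcycpos)]
          linear_combination hqc
    · rw [pvGoB, if_neg hlt]
      have : d = N := by omega
      subst this
      rfl

theorem B_eq_iter (cells : List Int) (N : Int) (hN : 0 ≤ N) :
    prisonAfterNDays_v1_alt cells N = pvStepB^[N.toNat] cells := by
  have := B_go_eq cells N N.toNat 0 PySem.Dict.empty (by omega) hN (by omega)
    (by intro p hp; simp [PySem.Dict.empty, PySem.Dict.items] at hp)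
  simpa [prisonAfterNDays_v1_alt] using this

theorem B_neg (cells : List Int) (N : Int) (hN : N < 0) :
    prisonAfterNDays_v1_alt cells N = cells := by
  rw [prisonAfterNDays_v1_alt, show N.toNat = 0 by omega, pvGoB, if_neg (by omega)]

theorem mod_two_cases (N : Int) : PySem.Int.mod N 2 = 0 ∨ PySem.Int.mod N 2 = 1 := by
  have h1 := PySem.Int.mod_nonneg (a := N) (b := 2) (by omega)
  have h2 := PySem.Int.mod_lt (a := N) (b := 2) (by omega)
  omega

-- ===== VERDICT (by name: the statement is the Claim_ definition above) =====
theorem prisonAfterNDays_v1_spec : Claim_unchanged_prisonAfterNDays_v1 := by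
  intro cells N _ hpre hnd
  by_cases hN : 0 ≤ N
  · by_cases hne : cells = []
    · have h0 : N = 0 := by
        rcases hpre with h | h
        · exact absurd hne h
        · omega
      subst hne h0
      decide
    · rw [A_eq_iter cells N hne hN, B_eq_iter cells N hN]
  · push_neg at hN
    rw [B_neg cells N hN, A_neg cells N hN]
    rcases mod_two_cases N with h | h
    · rw [h, if_neg (by decide)]
    · rw [h]
      simp only [beq_self_eq_true, if_true]
      unfold D_prisonAfterNDays_v1 at hnd
      push_neg at hnd
      exact (hnd hN h).symm

theorem prisonAfterNDays_v1_changed : Claim_changed_prisonAfterNDays_v1 := by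
  unfold Claim_changed_prisonAfterNDays_v1; decide

theorem prisonAfterNDays_v1_tight : Claim_exact_prisonAfterNDays_v1 := by
  intro cells N _ _ hD
  obtain ⟨hN, hmod, hne⟩ := hD
  rw [A_neg cells N hN, B_neg cells N hN, hmod]
  simp only [beq_self_eq_true, if_true]
  intro hc
  exact hne hc.symm
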